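-- pv_equiv track=rewrite | github.com/sahithyaswaminathan/competitive_programming | HackerRank/Encryption.py | ismincondition
-- ===== SOURCE A (Python) =====
-- import math
--
-- def ismincondition(L):
--     """
--     Input L - length of string without spaces
--     """
--     minlimit = math.floor(math.sqrt(L))
--     maxlimit = math.ceil(math.sqrt(L))
--     for cols in range(minlimit, maxlimit+1):
--         for rows in range(minlimit, cols+1):
--             if rows*cols >= L:
--                 break
--     return rows,cols
-- ===== SOURCE B (Python) =====
-- import math
--
-- def ismincondition(L):
--     r = math.isqrt(L)
--     c = r if r * r == L else r + 1
--     if r * c < L: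
--         r = c
--     return r, c
-- ===== Notes on version B (the rewrite author's own statement) =====
-- stated objective: simpler
-- what changed: Replaced the two nested search loops over range(floor(sqrt L), ...) with a direct closed-form computation from math.isqrt: cols = ceil(sqrt L), rows = floor(sqrt L) bumped to cols when floor*ceil < L.
import Mathlib
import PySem

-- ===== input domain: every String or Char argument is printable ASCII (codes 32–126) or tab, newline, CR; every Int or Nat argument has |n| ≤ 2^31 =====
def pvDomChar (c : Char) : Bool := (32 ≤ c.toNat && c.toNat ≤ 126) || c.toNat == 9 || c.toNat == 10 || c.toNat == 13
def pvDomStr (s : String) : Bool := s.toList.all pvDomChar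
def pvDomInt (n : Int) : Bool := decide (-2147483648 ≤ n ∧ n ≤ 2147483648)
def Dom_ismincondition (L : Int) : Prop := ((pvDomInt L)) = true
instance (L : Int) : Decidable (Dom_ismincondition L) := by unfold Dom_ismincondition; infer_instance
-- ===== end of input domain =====

-- B replaces A's two nested search loops by a closed-form computation from the integer
-- square root (rows/cols = floor/ceil of sqrt L, rows bumped when their product is short):
-- objective 'simpler'.


-- ===== PORT A =====
-- math.floor(math.sqrt(L)): exact as integer sqrt on the admitted domain (0 ≤ L ≤ 2^31,
-- where the double rounding of math.sqrt never crosses an integer boundary).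
def pvFloorSqrt (L : Int) : Int := Int.sqrt L

-- math.ceil(math.sqrt(L)): likewise exact on the admitted domain.
def pvCeilSqrt (L : Int) : Int :=
  if Int.sqrt L * Int.sqrt L == L then Int.sqrt L else Int.sqrt L + 1

-- inner 'for rows in range(...): if rows*cols >= L: break' — returns the final value of rows
def pvInner (L cols : Int) : List Int → Int → Int
  | [], rows => rows
  | r :: rest, rows => if r * cols ≥ L then r else pvInner L cols rest (if r * cols ≥ L then rows else r)

-- outer 'for cols in range(minlimit, maxlimit+1)' carrying (rows, cols)
def pvOuter (L minlimit : Int) : List Int → Int × Int → Int × Int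
  | [], st => st
  | c :: rest, st =>
      pvOuter L minlimit rest (pvInner L c (PySem.List.pyRange minlimit (c + 1) 1) st.1, c)

-- (0, 0) stands for the pre-loop (unbound) rows/cols; for every L in Pre_ the outer range is
-- nonempty and each inner range is nonempty, so these dummies are always overwritten.
def ismincondition (L : Int) : Int × Int :=
  let minlimit := pvFloorSqrt L
  let maxlimit := pvCeilSqrt L
  pvOuter L minlimit (PySem.List.pyRange minlimit (maxlimit + 1) 1) (0, 0)

-- ===== PORT B =====
def ismincondition_alt (L : Int) : Int × Int :=
  let r := Int.sqrt L            -- math.isqrt(L), exact for 0 ≤ L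
  let c := if r * r == L then r else r + 1
  let r' := if r * c < L then c else r
  (r', c)

-- ===== PRECONDITION & SPEC =====
-- Pre_ excludes negative L, on which both A (math.sqrt) and B (math.isqrt) raise ValueError.
def Pre_ismincondition (L : Int) : Prop := 0 ≤ L
instance (L : Int) : Decidable (Pre_ismincondition L) := by unfold Pre_ismincondition; infer_instance
def pvWitness_ismincondition : Int := 7

def Spec_ismincondition (L : Int) (out : Int × Int) : Prop := out = ismincondition_alt L
instance (L : Int) (out : Int × Int) : Decidable (Spec_ismincondition L out) := by unfold Spec_ismincondition; infer_instance

-- ===== CLAIM (what is proved, stated in full; the proofs are below) =====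
def Claim_equal_ismincondition : Prop := ∀ (L : Int), Dom_ismincondition L → Pre_ismincondition L → Spec_ismincondition L (ismincondition L)

-- ===== LEMMAS AND PROOFS =====
theorem pv_sqrt_le (L : Int) (h : 0 ≤ L) : Int.sqrt L * Int.sqrt L ≤ L := by
  have hL : L = ((L.toNat : Nat) : Int) := (Int.toNat_of_nonneg h).symm
  rw [hL, Int.sqrt_natCast]
  have h := Nat.sqrt_le' L.toNat
  rw [pow_two] at h
  exact_mod_cast h

theorem pv_lt_succ_sqrt (L : Int) (h : 0 ≤ L) : L < (Int.sqrt L + 1) * (Int.sqrt L + 1) := by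
  have hL : L = ((L.toNat : Nat) : Int) := (Int.toNat_of_nonneg h).symm
  rw [hL, Int.sqrt_natCast]
  have h := Nat.lt_succ_sqrt' L.toNat
  rw [pow_two] at h
  exact_mod_cast h

theorem pv_range_one (a : Int) : PySem.List.pyRange a (a + 1) 1 = [a] := by
  rw [PySem.List.pyRange_one]
  norm_num

theorem pv_range_two (a : Int) : PySem.List.pyRange a (a + 2) 1 = [a, a + 1] := by
  rw [PySem.List.pyRange_one]
  have h2 : (a + 2 - a).toNat = 2 := by omega
  rw [h2]
  simp [List.range_succ]

-- ===== VERDICT (by name: the statement is the Claim_ definition above) =====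
theorem ismincondition_spec : Claim_equal_ismincondition := by
  intro L _ hL
  unfold Spec_ismincondition ismincondition ismincondition_alt pvFloorSqrt pvCeilSqrt
  set s := Int.sqrt L with hsdef
  have h1 : s * s ≤ L := pv_sqrt_le L hL
  have h2 : L < (s + 1) * (s + 1) := pv_lt_succ_sqrt L hL
  by_cases hsq : s * s = L
  · -- perfect square: outer range is [s], inner range is [s]
    simp only [hsq, beq_self_eq_true, if_true]
    rw [pv_range_one]
    simp only [pvOuter]
    rw [pv_range_one]
    have hge : L ≤ s * s := le_of_eq hsq.symm
    simp [pvInner, hge, hsq, not_lt.mpr hge]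
  · -- not a perfect square: outer range is [s, s+1]
    have hne : (s * s == L) = false := by simp [hsq]
    simp only [hne, if_neg, Bool.false_eq_true, if_false]
    have hr2 : s + 1 + 1 = s + 2 := by ring
    rw [hr2, pv_range_two]
    simp only [pvOuter]
    rw [pv_range_one, hr2, pv_range_two]
    have hlt : ¬ (s * s ≥ L) := by omega
    have hbig : (s + 1) * (s + 1) ≥ L := le_of_lt h2
    by_cases hmid : s * (s + 1) ≥ L
    · simp [pvInner, hlt, hmid, not_lt.mpr hmid]
    · simp [pvInner, hlt, hmid, hbig, lt_of_not_ge hmid]
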